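-- pv_equiv track=rewrite | github.com/Pjerez98/Proyectos | Programación Aplicada a la Ingeniería Industrial/Branch and Bound/branch_and_bound.py | primer_coef
-- ===== SOURCE A (Python) =====
-- def primer_coef(soluciones):#primera variable no binaria dentro de la solución
--     pos=-1
--     for i in range(0,len(soluciones)):
--         if soluciones[i]!=0 and soluciones[i]!=1:#primera variable no binaria
--             pos=i
--     if pos==-1:
--         return None
--     else:
--         return pos
-- ===== SOURCE B (Python) =====
-- def primer_coef(soluciones):
--     # Scan from the end; the first non-binary element found is the last one overall.
--     for i in range(len(soluciones) - 1, -1, -1):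
--         if soluciones[i] != 0 and soluciones[i] != 1:
--             return i
--     return None
-- ===== Notes on version B (the rewrite author's own statement) =====
-- stated objective: idiomatic
-- what changed: Replaces A's full forward scan that keeps overwriting a running 'pos' accumulator with an early-returning reverse search: iterate from the last index down and return the first non-binary index immediately, no accumulator and no sentinel -1.
import Mathlib
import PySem

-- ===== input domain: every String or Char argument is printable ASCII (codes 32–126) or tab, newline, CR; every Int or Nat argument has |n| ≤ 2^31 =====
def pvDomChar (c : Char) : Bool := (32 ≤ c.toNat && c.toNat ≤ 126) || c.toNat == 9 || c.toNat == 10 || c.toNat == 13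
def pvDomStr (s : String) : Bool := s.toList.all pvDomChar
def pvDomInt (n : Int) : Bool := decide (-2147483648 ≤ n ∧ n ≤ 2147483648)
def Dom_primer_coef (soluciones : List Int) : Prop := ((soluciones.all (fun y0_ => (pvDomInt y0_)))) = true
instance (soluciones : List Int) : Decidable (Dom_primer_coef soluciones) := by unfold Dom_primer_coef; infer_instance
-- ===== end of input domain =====

-- B is an early-returning reverse search instead of A's full forward accumulating scan; return values only, no side effects.

-- ===== PORT A =====
-- forward loop over range(0, len): keep overwriting pos with the current index when the
-- element is non-binary; soluciones[i] is always in range, so pyGetD with default 0 is exact.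
def primer_coef (soluciones : List Int) : Option Int :=
  let pos := (PySem.List.pyRange 0 (soluciones.length : Int) 1).foldl
    (fun pos i =>
      if PySem.List.pyGetD soluciones i 0 != 0 && PySem.List.pyGetD soluciones i 0 != 1 then i else pos)
    (-1)
  if pos = -1 then none else some pos

-- ===== PORT B =====
-- early-returning reverse loop for i in range(len-1, -1, -1): the early 'return i' is the
-- first match of the countdown range, i.e. List.find?; indices are always in range, pyGetD exact.
def primer_coef_alt (soluciones : List Int) : Option Int :=
  (PySem.List.pyRange ((soluciones.length : Int) - 1) (-1) (-1)).find?
    (fun i => PySem.List.pyGetD soluciones i 0 != 0 && PySem.List.pyGetD soluciones i 0 != 1)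

-- ===== PRECONDITION & SPEC =====
def Spec_primer_coef (soluciones : List Int) (out : Option Int) : Prop := out = primer_coef_alt soluciones
instance (soluciones : List Int) (out : Option Int) : Decidable (Spec_primer_coef soluciones out) := by unfold Spec_primer_coef; infer_instance

-- ===== CLAIM (what is proved, stated in full; the proofs are below) =====
def Claim_equal_primer_coef : Prop := ∀ (soluciones : List Int), Dom_primer_coef soluciones → Spec_primer_coef soluciones (primer_coef soluciones)

-- ===== LEMMAS AND PROOFS =====

-- A's "keep the last matching element" fold is the first match of the reversed list.
theorem foldl_last_match (p : Int → Bool) :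
    ∀ (L : List Int) (a : Int),
      L.foldl (fun pos i => if p i then i else pos) a = (L.reverse.find? p).getD a := by
  intro L
  induction L with
  | nil => intro a; simp
  | cons x xs ih =>
    intro a
    simp only [List.foldl_cons, List.reverse_cons, List.find?_append, ih]
    cases h : xs.reverse.find? p with
    | none => split <;> simp_all
    | some y => simp

-- ===== VERDICT (by name: the statement is the Claim_ definition above) =====
theorem primer_coef_spec : Claim_equal_primer_coef := by
  intro s _
  unfold Spec_primer_coef primer_coef primer_coef_alt
  rw [PySem.List.pyRange_neg_one_eq_reverse]
  simp only [neg_add_cancel, sub_add_cancel]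
  rw [foldl_last_match]
  cases h : ((PySem.List.pyRange 0 (s.length : Int) 1).reverse.find?
      (fun i => PySem.List.pyGetD s i 0 != 0 && PySem.List.pyGetD s i 0 != 1)) with
  | none => simp
  | some y =>
    have hy : y ∈ PySem.List.pyRange 0 (s.length : Int) 1 := by
      have := List.mem_of_find?_eq_some h
      simpa using this
    have : 0 ≤ y := ((PySem.List.mem_pyRange_one).1 hy).1
    simp [show ¬ (y = -1) by omega]
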